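-- pv_equiv track=rewrite | github.com/vladrochian/formal-grammar-utils | main.py | get_word_transitions_from_rule
-- ===== SOURCE A (Python) =====
-- from typing import List, Tuple, Dict
--
-- def get_word_transitions_from_rule(w: str, from_str: str, to_str: str) -> List[str]:
--     pos = w.find(from_str)
--     ans: List[str] = []
--     while pos != -1:
--         new_w = w[:pos] + to_str + w[pos + len(from_str):]
--         ans.append(new_w)
--         pos = w.find(from_str, pos + 1)
--     return ans
-- ===== SOURCE B (Python) =====
-- def get_word_transitions_from_rule(w, from_str, to_str):
--     n, m = len(w), len(from_str)
--     poss = list(range(n - m + 1))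
--     for j, c in enumerate(from_str):
--         poss = [i for i in poss if w[i + j] == c]
--     return [w[:i] + to_str + w[i + m:] for i in poss]
-- ===== Notes on version B (the rewrite author's own statement) =====
-- stated objective: alternative
-- what changed: Inverts the loop structure: instead of A's stateful while-loop jumping occurrence-to-occurrence with str.find, B loops over the PATTERN characters, each pass filtering a candidate-position list (staged pattern-major filtering), then maps the surviving positions to rewritten words.
import Mathlib
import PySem

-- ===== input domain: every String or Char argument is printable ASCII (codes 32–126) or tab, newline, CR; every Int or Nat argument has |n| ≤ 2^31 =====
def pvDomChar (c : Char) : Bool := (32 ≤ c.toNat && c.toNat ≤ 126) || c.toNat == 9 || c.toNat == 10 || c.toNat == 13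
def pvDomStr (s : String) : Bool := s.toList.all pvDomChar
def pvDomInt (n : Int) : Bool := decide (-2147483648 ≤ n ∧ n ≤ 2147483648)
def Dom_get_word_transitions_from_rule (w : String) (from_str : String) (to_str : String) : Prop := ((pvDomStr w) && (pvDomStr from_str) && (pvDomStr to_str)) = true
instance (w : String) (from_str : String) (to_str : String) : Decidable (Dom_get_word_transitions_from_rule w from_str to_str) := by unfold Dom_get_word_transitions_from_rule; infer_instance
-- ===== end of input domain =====

-- B inverts the loop structure: a pattern-major staged filter over candidate positions instead of A's stateful str.find while-loop (alternative, same cost).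


-- ===== PORT A =====
-- the while-loop: pos jumps from occurrence to occurrence via w.find(from_str, pos + 1);
-- fuel (length + 2) only makes the recursion structural — it is never exhausted, since pos strictly increases and is ≤ len(w)
def pvALoop (cs fs ts : List Char) (fuel : Nat) (pos : Int) : List String :=
  match fuel with
  | 0 => []
  | fuel' + 1 =>
    if pos = -1 then []
    else
      String.ofList (PySem.Chars.slice cs none (some pos) ++ ts ++
          PySem.Chars.slice cs (some (pos + (fs.length : Int))) none) ::
        pvALoop cs fs ts fuel' (PySem.Chars.findFrom cs fs (pos + 1) none)

def get_word_transitions_from_rule (w : String) (from_str : String) (to_str : String) : List String :=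
  pvALoop w.toList from_str.toList to_str.toList (w.toList.length + 2)
    (PySem.Chars.find w.toList from_str.toList)

-- ===== PORT B =====
-- Source B: poss = list(range(n - m + 1)); one filtering pass per pattern character; then map positions to words.
-- (w[i + j] is ported as pyGet? == some c: every surviving i has i + j in range, so Python never raises here.)
def get_word_transitions_from_rule_alt (w : String) (from_str : String) (to_str : String) : List String :=
  let cs := w.toList
  let fs := from_str.toList
  let ts := to_str.toList
  let m : Int := fs.length
  let poss0 := PySem.List.pyRange 0 ((cs.length : Int) - m + 1) 1
  let poss := (PySem.List.enumerate fs 0).foldl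
      (fun ps jc => ps.filter (fun i => PySem.Chars.pyGet? cs (i + jc.1) == some jc.2)) poss0
  poss.map (fun i => String.ofList (PySem.Chars.slice cs none (some i) ++ ts ++
      PySem.Chars.slice cs (some (i + m)) none))

-- ===== PRECONDITION & SPEC =====
def Spec_get_word_transitions_from_rule (w : String) (from_str : String) (to_str : String) (out : List String) : Prop := out = get_word_transitions_from_rule_alt w from_str to_str
instance (w : String) (from_str : String) (to_str : String) (out : List String) : Decidable (Spec_get_word_transitions_from_rule w from_str to_str out) := by unfold Spec_get_word_transitions_from_rule; infer_instance

-- ===== CLAIM (what is proved, stated in full; the proofs are below) =====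
def Claim_equal_get_word_transitions_from_rule : Prop := ∀ (w : String) (from_str : String) (to_str : String), Dom_get_word_transitions_from_rule w from_str to_str → Spec_get_word_transitions_from_rule w from_str to_str (get_word_transitions_from_rule w from_str to_str)

-- ===== LEMMAS AND PROOFS =====

-- the canonical value both programs compute: the match positions in increasing order, mapped to the rewritten word
def pvOut (cs ts : List Char) (m i : Nat) : String :=
  String.ofList (cs.take i ++ ts ++ cs.drop (i + m))

def pvCanon (cs fs ts : List Char) (k : Nat) : List String :=
  ((List.range (cs.length + 1 - fs.length)).filter
      (fun i => decide (k ≤ i ∧ fs <+: cs.drop i))).map (pvOut cs ts fs.length)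

theorem pvOutCast (cs ts : List Char) (m i : Nat) :
    String.ofList (PySem.Chars.slice cs none (some (i : Int)) ++ ts ++
        PySem.Chars.slice cs (some ((i : Int) + (m : Int))) none) = pvOut cs ts m i := by
  have h2 : ((i : Int) + (m : Int)) = (((i + m : Nat)) : Int) := by push_cast; ring
  rw [pvOut, h2]
  simp only [PySem.Chars.slice_eq_listSlice]
  rw [PySem.List.slice_to_natCast, PySem.List.slice_from_natCast]

theorem pvNoOcc {cs fs : List Char} {k i : Nat} (hk : k ≤ i)
    (h : fs <+: List.drop i cs) : fs <:+: List.drop k cs := by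
  have : List.drop i cs = List.drop (i - k) (List.drop k cs) := by
    rw [List.drop_drop]; congr 1; omega
  rw [this] at h
  exact h.isInfix.trans (List.drop_suffix _ _).isInfix

theorem pvFilter_min {N q k : Nat} {P : Nat → Prop} [DecidablePred P]
    (hq : q < N) (hkq : k ≤ q) (hP : P q)
    (hmin : ∀ i, k ≤ i → i < q → ¬ P i) :
    (List.range N).filter (fun i => decide (k ≤ i ∧ P i)) =
      q :: (List.range N).filter (fun i => decide (q + 1 ≤ i ∧ P i)) := by
  have hsplit : List.range N = List.range' 0 q ++ (q :: List.range' (q + 1) (N - q - 1)) := by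
    rw [List.range_eq_range']
    have hd : N - q = (N - q - 1) + 1 := by omega
    have h1 : (q :: List.range' (q + 1) (N - q - 1)) = List.range' q (N - q) := by
      conv_rhs => rw [hd]
      rw [List.range'_succ]
    rw [h1]
    have h2 := @List.range'_append 0 q (N - q) 1
    simp only [one_mul, Nat.zero_add] at h2
    have h3 : q + (N - q) = N := by omega
    rw [h3] at h2
    exact h2.symm
  rw [hsplit]
  simp only [List.filter_append, List.filter_cons]
  have h1 : List.filter (fun i => decide (k ≤ i ∧ P i)) (List.range' 0 q) = [] := by
    rw [List.filter_eq_nil_iff]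
    intro a ha
    have : a < q := by have := List.mem_range'_1.mp ha; omega
    simp only [decide_eq_true_eq, not_and]
    intro hka; exact hmin a hka this
  have h2 : List.filter (fun i => decide (q + 1 ≤ i ∧ P i)) (List.range' 0 q) = [] := by
    rw [List.filter_eq_nil_iff]
    intro a ha
    have : a < q := by have := List.mem_range'_1.mp ha; omega
    simp only [decide_eq_true_eq, not_and]
    omega
  rw [h1, h2]
  have hq1 : decide (k ≤ q ∧ P q) = true := by simp [hkq, hP]
  have hq2 : decide (q + 1 ≤ q ∧ P q) = false := by simp
  rw [hq1, hq2]
  simp only [List.nil_append, if_true, Bool.false_eq_true, if_false]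
  congr 1
  apply List.filter_congr
  intro a ha
  have : q + 1 ≤ a := by have := List.mem_range'_1.mp ha; omega
  simp [this]; omega

theorem pvFilter_none {cs fs : List Char} {k N : Nat}
    (h : ¬ fs <:+: List.drop k cs) :
    (List.range N).filter (fun i => decide (k ≤ i ∧ fs <+: List.drop i cs)) = [] := by
  rw [List.filter_eq_nil_iff]
  intro a _
  simp only [decide_eq_true_eq, not_and]
  intro hka hpre
  exact h (pvNoOcc hka hpre)

theorem pvFindFrom_past (cs fs : List Char) :
    PySem.Chars.findFrom cs fs ((cs.length : Int) + 1) none = -1 := by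
  simp only [PySem.Chars.findFrom]
  have h1 : ¬ ((cs.length : Int) + 1 < 0) := by omega
  have h2 : (cs.length : Int) < (cs.length : Int) + 1 := by omega
  simp [h1, h2]

theorem pvLoopA (cs fs ts : List Char) :
    ∀ (fuel k : Nat), k ≤ cs.length + 1 → cs.length + 2 - k ≤ fuel →
    pvALoop cs fs ts fuel (PySem.Chars.findFrom cs fs (k : Int) none) =
      pvCanon cs fs ts k := by
  intro fuel
  induction fuel with
  | zero => intro k hk hf; omega
  | succ fuel' ih =>
    intro k hk hf
    by_cases hend : PySem.Chars.findFrom cs fs (k : Int) none = -1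
    · rw [hend]
      have hnil : pvALoop cs fs ts (fuel' + 1) (-1) = [] := by simp [pvALoop]
      rw [hnil]
      by_cases hkl : k ≤ cs.length
      · have hno := (PySem.Chars.findFrom_natCast_eq_neg_one_iff cs fs k hkl).mp hend
        rw [pvCanon, pvFilter_none hno, List.map_nil]
      · -- k = length + 1: every i in range is < k
        rw [pvCanon]
        have : (List.range (cs.length + 1 - fs.length)).filter
            (fun i => decide (k ≤ i ∧ fs <+: cs.drop i)) = [] := by
          rw [List.filter_eq_nil_iff]
          intro a ha
          have : a < cs.length + 1 - fs.length := List.mem_range.mp ha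
          simp only [decide_eq_true_eq, not_and]
          intro h; omega
        rw [this, List.map_nil]
    · have hkl : k ≤ cs.length := by
        by_contra hgt
        have hk1 : k = cs.length + 1 := by omega
        rw [hk1] at hend
        exact hend (by exact_mod_cast pvFindFrom_past cs fs)
      obtain ⟨hkp, hocc, hmin⟩ := PySem.Chars.findFrom_natCast_spec cs fs k hkl hend
      set p := PySem.Chars.findFrom cs fs (k : Int) none with hp
      have hp0 : 0 ≤ p := le_trans (by exact_mod_cast Nat.zero_le k) hkp
      set q := p.toNat with hqdef
      have hpq : p = (q : Int) := by omega
      -- p ≤ length: p = k + find (drop k cs) fs and find ≤ length of drop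
      have hple : p ≤ (cs.length : Int) := by
        rw [hp, PySem.Chars.findFrom_natCast cs fs k hkl]
        split
        · omega
        · have := PySem.Chars.find_le_length (List.drop k cs) fs
          simp only [List.length_drop] at this
          omega
      have hqle : q ≤ cs.length := by omega
      have hmle : fs.length ≤ (List.drop q cs).length := hocc.length_le
      have hqm : q + fs.length ≤ cs.length := by
        simp only [List.length_drop] at hmle; omega
      have hqN : q < cs.length + 1 - fs.length := by omega
      have hkq : k ≤ q := by omega
      -- unfold one loop step
      rw [pvALoop]
      rw [if_neg hend]
      have hstep : p + 1 = ((q + 1 : Nat) : Int) := by omega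
      rw [hstep]
      rw [ih (q + 1) (by omega) (by omega)]
      rw [pvCanon, pvCanon]
      rw [pvFilter_min hqN hkq hocc (fun i h1 h2 => hmin i h1 h2)]
      rw [List.map_cons]
      -- the produced word equals pvOut at q
      have hhead : String.ofList (PySem.Chars.slice cs none (some p) ++ ts ++
          PySem.Chars.slice cs (some (p + (fs.length : Int))) none) = pvOut cs ts fs.length q := by
        rw [hpq]; exact pvOutCast cs ts fs.length q
      rw [hhead]

-- a fold of filters is one filter by the conjunction of all the per-pass predicates
theorem pvFoldFilter {α β : Type} (l : List β) (ps : List α) (p : β → α → Bool) :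
    l.foldl (fun ps b => ps.filter (p b)) ps = ps.filter (fun a => l.all (fun b => p b a)) := by
  induction l generalizing ps with
  | nil => simp
  | cons b l ih =>
    simp only [List.foldl_cons, ih, List.filter_filter, List.all_cons]
    apply List.filter_congr
    intro a _
    rw [Bool.and_comm]

-- passing every per-character test is exactly "fs is a prefix of cs dropped at the position"
theorem pvAllMatch (fs : List Char) : ∀ (cs : List Char) (a b : Nat),
    ((PySem.List.enumerate fs (a : Int)).all
        (fun jc => PySem.Chars.pyGet? cs ((b : Int) + jc.1) == some jc.2)) =
      decide (fs <+: cs.drop (b + a)) := by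
  induction fs with
  | nil => intro cs a b; simp [PySem.List.enumerate_nil]
  | cons f fs ih =>
    intro cs a b
    rw [PySem.List.enumerate_cons, List.all_cons]
    have hc : ((a : Int) + 1) = ((a + 1 : Nat) : Int) := by push_cast; ring
    rw [hc, ih cs (a + 1) b]
    have hba : b + (a + 1) = (b + a) + 1 := by omega
    rw [hba]
    have hidx : ((b : Int) + (a : Int)) = (((b + a : Nat)) : Int) := by push_cast; ring
    have hg : PySem.Chars.pyGet? cs ((b : Int) + (a : Int)) = cs[b + a]? := by
      rw [hidx]; exact PySem.List.pyGet?_natCast cs (b + a)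
    rw [hg]
    by_cases h : b + a < cs.length
    · have hpre : (f :: fs <+: List.drop (b + a) cs) ↔
          (f = cs[b + a] ∧ fs <+: List.drop (b + a + 1) cs) := by
        conv_lhs => rw [List.drop_eq_getElem_cons h]
        rw [List.cons_prefix_cons]
      rw [List.getElem?_eq_getElem h]
      by_cases he : f = cs[b + a]
      · simp only [hpre]; simp [he]
      · have hne : cs[b + a] ≠ f := fun hh => he hh.symm
        simp only [hpre]; simp [he, hne]
    · have hdrop : cs.drop (b + a) = [] := List.drop_eq_nil_of_le (by omega)
      rw [hdrop, List.getElem?_eq_none (by omega : cs.length ≤ b + a)]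
      simp

theorem pvAltCanon (cs fs ts : List Char) :
    ((PySem.List.enumerate fs 0).foldl
        (fun ps jc => ps.filter (fun i => PySem.Chars.pyGet? cs (i + jc.1) == some jc.2))
        (PySem.List.pyRange 0 ((cs.length : Int) - (fs.length : Int) + 1) 1)).map
      (fun i => String.ofList (PySem.Chars.slice cs none (some i) ++ ts ++
          PySem.Chars.slice cs (some (i + (fs.length : Int))) none)) =
    pvCanon cs fs ts 0 := by
  rw [pvFoldFilter]
  by_cases hm : fs.length ≤ cs.length + 1
  · have hN : ((cs.length : Int) - (fs.length : Int) + 1) = ((cs.length + 1 - fs.length : Nat) : Int) := by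
      push_cast [Nat.cast_sub hm]; ring
    rw [hN, PySem.List.pyRange_zero_natCast]
    rw [List.filter_map, List.map_map]
    rw [pvCanon]
    have hpred : ∀ k ∈ List.range (cs.length + 1 - fs.length),
        ((fun i : Int => (PySem.List.enumerate fs 0).all
            (fun jc => PySem.Chars.pyGet? cs (i + jc.1) == some jc.2)) ∘
          (fun k : Nat => (k : Int))) k =
        decide ((0 : Nat) ≤ k ∧ fs <+: cs.drop k) := by
      intro k _
      simp only [Function.comp]
      have h0 : (0 : Int) = ((0 : Nat) : Int) := rfl
      rw [h0, pvAllMatch fs cs 0 k]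
      simp
    rw [List.filter_congr hpred]
    apply List.map_congr_left
    intro i _
    simp only [Function.comp_apply]
    exact pvOutCast cs ts fs.length i
  · have hneg : ¬ ((0:Int) < (cs.length : Int) - (fs.length : Int) + 1) := by omega
    have : PySem.List.pyRange 0 ((cs.length : Int) - (fs.length : Int) + 1) 1 = [] := by
      simp [PySem.List.pyRange, hneg]
    rw [this]
    have : cs.length + 1 - fs.length = 0 := by omega
    rw [pvCanon, this]
    simp

-- ===== VERDICT (by name: the statement is the Claim_ definition above) =====
theorem get_word_transitions_from_rule_spec : Claim_equal_get_word_transitions_from_rule := by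
  intro w from_str to_str _
  unfold Spec_get_word_transitions_from_rule
  unfold get_word_transitions_from_rule get_word_transitions_from_rule_alt
  rw [pvAltCanon]
  rw [← PySem.Chars.findFrom_zero]
  have := pvLoopA w.toList from_str.toList to_str.toList (w.toList.length + 2) 0 (by omega) (by omega)
  simpa using this
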